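-- pv_equiv track=rewrite | github.com/miuqom2/codfiscale | codicefiscaleweb.py | estrai_nome_cognome
-- ===== SOURCE A (Python) =====
-- vocali = ('a','e','i','o','u')
--
-- def estrai_nome_cognome(aString):
-- 	aString=aString.replace(" ","")
-- 	temp_string = ''
-- 	for aChar in aString:
-- 		if not aChar in vocali:
-- 			temp_string += aChar
-- 		if len(temp_string) >= 3:
-- 			break
-- 	index = 0
-- 	while len(temp_string) < 3:
-- 		if not aString[index] in temp_string:
-- 			temp_string += aString[index]
-- 		index += 1
--
-- 	return temp_string
-- ===== SOURCE B (Python) =====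
-- vocali = ('a','e','i','o','u')
--
-- def estrai_nome_cognome(aString):
--     s = aString.replace(" ", "")
--     consonants = [c for c in s if c not in vocali]
--     if len(consonants) >= 3:
--         return ''.join(consonants[:3])
--     seen = []
--     for c in s:
--         if c in vocali and c not in seen:
--             seen.append(c)
--     return ''.join((consonants + seen)[:3])
-- ===== Notes on version B (the rewrite author's own statement) =====
-- stated objective: simpler
-- what changed: A's break-early consonant loop followed by an index-based while pad (which may raise IndexError) is replaced by a filter of the consonants plus one pass collecting distinct vowels, concatenated and truncated to 3.
import Mathlib
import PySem

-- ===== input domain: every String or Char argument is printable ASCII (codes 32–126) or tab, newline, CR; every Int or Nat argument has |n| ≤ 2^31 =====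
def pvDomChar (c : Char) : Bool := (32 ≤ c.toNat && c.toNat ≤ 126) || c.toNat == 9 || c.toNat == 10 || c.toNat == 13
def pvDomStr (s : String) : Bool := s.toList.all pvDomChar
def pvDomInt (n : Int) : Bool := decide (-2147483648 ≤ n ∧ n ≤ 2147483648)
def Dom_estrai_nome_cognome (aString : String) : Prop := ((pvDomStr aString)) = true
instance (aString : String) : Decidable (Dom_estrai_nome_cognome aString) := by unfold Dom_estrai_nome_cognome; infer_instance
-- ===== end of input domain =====

-- B replaces A's break-early consonant loop + index-based while pad by a consonant filter
-- plus one pass collecting distinct vowels, concatenated and truncated to 3 (objective: simpler).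

-- ===== PORT A =====
def pvVocali : List Char := ['a', 'e', 'i', 'o', 'u']

-- the 'for aChar in aString' loop with its break
def pvAFor : List Char → List Char → List Char
  | [], temp => temp
  | c :: rest, temp =>
    let temp' := if pvVocali.contains c then temp else temp ++ [c]
    if 3 ≤ temp'.length then temp' else pvAFor rest temp'

-- the 'while len(temp_string) < 3' loop; fuel makes it total, IndexError (= none) returns temp
-- (those inputs are excluded by Pre_)
def pvAWhile (s : List Char) : Nat → Nat → List Char → List Char
  | 0, _, temp => temp
  | fuel + 1, index, temp =>
    if temp.length < 3 then
      match PySem.List.pyGet? s (index : Int) with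
      | none => temp
      | some c => pvAWhile s fuel (index + 1) (if temp.contains c then temp else temp ++ [c])
    else temp

def estrai_nome_cognome (aString : String) : String :=
  let s := (PySem.Str.replace aString " " "").toList
  String.mk (pvAWhile s (s.length + 1) 0 (pvAFor s []))

-- ===== PORT B =====
-- the 'for c in s' loop collecting distinct vowels
def pvSeen (l : List Char) (seen : List Char) : List Char :=
  l.foldl (fun seen c => if pvVocali.contains c && !seen.contains c then seen ++ [c] else seen) seen

def estrai_nome_cognome_alt (aString : String) : String :=
  let s := (PySem.Str.replace aString " " "").toList
  let consonants := s.filter (fun c => !pvVocali.contains c)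
  if 3 ≤ consonants.length then String.mk (consonants.take 3)
  else String.mk ((consonants ++ pvSeen s []).take 3)

-- ===== PRECONDITION & SPEC =====
-- Pre_ excludes exactly the inputs on which A raises IndexError: after removing spaces,
-- the number of non-vowel chars plus the number of distinct vowels must be at least 3.
def Pre_estrai_nome_cognome (aString : String) : Prop :=
  3 ≤ ((PySem.Str.replace aString " " "").toList.filter (fun c => !pvVocali.contains c)).length
      + ((PySem.Str.replace aString " " "").toList.filter (fun c => pvVocali.contains c)).dedup.length
instance (aString : String) : Decidable (Pre_estrai_nome_cognome aString) := by
  unfold Pre_estrai_nome_cognome; infer_instance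

def pvWitness_estrai_nome_cognome : String := "rossi"

def Spec_estrai_nome_cognome (aString : String) (out : String) : Prop := out = estrai_nome_cognome_alt aString
instance (aString : String) (out : String) : Decidable (Spec_estrai_nome_cognome aString out) := by unfold Spec_estrai_nome_cognome; infer_instance

-- ===== CLAIM (what is proved, stated in full; the proofs are below) =====
def Claim_equal_estrai_nome_cognome : Prop := ∀ (aString : String), Dom_estrai_nome_cognome aString → Pre_estrai_nome_cognome aString → Spec_estrai_nome_cognome aString (estrai_nome_cognome aString)


-- ===== LEMMAS AND PROOFS =====

lemma pvAFor_eq_take (s : List Char) : ∀ temp : List Char, temp.length < 3 →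
    pvAFor s temp = (temp ++ s.filter (fun c => !pvVocali.contains c)).take 3 := by
  induction s with
  | nil => intro temp h; simp [pvAFor, List.take_of_length_le (Nat.le_of_lt h)]
  | cons c rest ih =>
    intro temp h
    simp only [pvAFor]
    by_cases hv : pvVocali.contains c = true
    · rw [if_pos hv, if_neg (by simpa using Nat.not_le.mpr h), ih temp h,
        List.filter_cons_of_neg (by simpa using hv)]
    · rw [if_neg hv]
      by_cases h3 : 3 ≤ (temp ++ [c]).length
      · rw [if_pos h3]
        have hlen : (temp ++ [c]).length = 3 := by simp at h3 ⊢; omega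
        rw [List.filter_cons_of_pos (by simpa using hv),
          show temp ++ c :: List.filter (fun c => !pvVocali.contains c) rest
              = (temp ++ [c]) ++ List.filter (fun c => !pvVocali.contains c) rest by simp,
          ← hlen, List.take_left]
      · rw [if_neg h3, ih (temp ++ [c]) (by simp at h3 ⊢; omega),
          List.filter_cons_of_pos (by simpa using hv)]
        congr 1
        simp

lemma pvSeen_cons (c : Char) (l seen : List Char) :
    pvSeen (c :: l) seen
      = pvSeen l (if pvVocali.contains c && !seen.contains c then seen ++ [c] else seen) := by
  simp [pvSeen]

lemma pvSeen_singleton (c : Char) (seen : List Char) :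
    pvSeen [c] seen
      = if pvVocali.contains c && !seen.contains c then seen ++ [c] else seen := by
  simp [pvSeen]

lemma pvSeen_append (l₁ l₂ seen : List Char) :
    pvSeen (l₁ ++ l₂) seen = pvSeen l₂ (pvSeen l₁ seen) := by
  simp [pvSeen, List.foldl_append]

lemma pvSeen_acc_prefix (l : List Char) : ∀ seen : List Char, seen <+: pvSeen l seen := by
  induction l with
  | nil => intro seen; simp [pvSeen]
  | cons c rest ih =>
    intro seen
    rw [pvSeen_cons]
    by_cases h : (pvVocali.contains c && !seen.contains c) = true
    · rw [if_pos h]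
      exact List.IsPrefix.trans ⟨[c], rfl⟩ (ih (seen ++ [c]))
    · rw [if_neg h]
      exact ih seen

lemma pvSeen_mem (l : List Char) : ∀ (seen : List Char) (c : Char),
    c ∈ pvSeen l seen ↔ c ∈ seen ∨ (c ∈ l ∧ pvVocali.contains c) := by
  induction l with
  | nil => intro seen c; simp [pvSeen]
  | cons d rest ih =>
    intro seen c
    rw [pvSeen_cons]
    by_cases h : (pvVocali.contains d && !seen.contains d) = true
    · have hd : pvVocali.contains d = true := by
        simpa using (Bool.and_eq_true _ _ |>.mp h).1
      rw [if_pos h, ih]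
      have hd' : d ∈ pvVocali := by simpa using hd
      by_cases hcd : c = d
      · subst hcd; simp [hd']
      · simp [List.mem_append, hcd]
    · rw [if_neg h, ih]
      by_cases hcd : c = d
      · subst hcd
        simp only [Bool.and_eq_true, Bool.not_eq_true', List.contains_eq_mem,
          decide_eq_true_eq, decide_eq_false_iff_not, not_and, not_not] at h
        by_cases hv : c ∈ pvVocali
        · have hcs : c ∈ seen := h hv
          simp [hcs]
        · simp [List.contains_eq_mem, hv]
      · simp [hcd]

lemma pvSeen_nodup (l : List Char) : ∀ seen : List Char, seen.Nodup → (pvSeen l seen).Nodup := by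
  induction l with
  | nil => intro seen h; simpa [pvSeen]
  | cons c rest ih =>
    intro seen h
    rw [pvSeen_cons]
    by_cases hc : (pvVocali.contains c && !seen.contains c) = true
    · rw [if_pos hc]
      apply ih
      have : c ∉ seen := by
        simpa using (Bool.and_eq_true _ _ |>.mp hc).2
      simp [List.nodup_append, h]
      exact fun a ha e => this (e ▸ ha)
    · rw [if_neg hc]; exact ih seen h

lemma pvSeen_length (s : List Char) :
    (pvSeen s []).length = (s.filter (fun c => pvVocali.contains c)).dedup.length := by
  have h1 : (pvSeen s []).Nodup := pvSeen_nodup s [] (by simp)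
  have h2 : (s.filter (fun c => pvVocali.contains c)).dedup.Nodup := List.nodup_dedup _
  have hm : ∀ c, c ∈ pvSeen s [] ↔ c ∈ (s.filter (fun c => pvVocali.contains c)).dedup := by
    intro c
    simp [pvSeen_mem, List.mem_dedup, List.mem_filter, and_comm]
  have : (pvSeen s []).toFinset = (s.filter (fun c => pvVocali.contains c)).dedup.toFinset := by
    apply Finset.ext; intro c; simpa using hm c
  calc (pvSeen s []).length = (pvSeen s []).toFinset.card := (List.toFinset_card_of_nodup h1).symm
    _ = (s.filter (fun c => pvVocali.contains c)).dedup.toFinset.card := by rw [this]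
    _ = (s.filter (fun c => pvVocali.contains c)).dedup.length := List.toFinset_card_of_nodup h2

-- the while-loop invariant: temp = consonants ++ distinct vowels seen so far
lemma pvAWhile_eq (s : List Char) :
    ∀ fuel i temp,
      temp = s.filter (fun c => !pvVocali.contains c) ++ pvSeen (s.take i) [] →
      temp.length ≤ 3 →
      s.length - i < fuel →
      3 ≤ (s.filter (fun c => !pvVocali.contains c) ++ pvSeen s []).length →
      pvAWhile s fuel i temp
        = (s.filter (fun c => !pvVocali.contains c) ++ pvSeen s []).take 3 := by
  intro fuel
  induction fuel with
  | zero => intro i temp _ _ hf _; omega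
  | succ fuel ih =>
    intro i temp hinv hle hf htot
    set cons := s.filter (fun c => !pvVocali.contains c) with hcons
    have hprefix : temp <+: cons ++ pvSeen s [] := by
      rw [hinv]
      have hp : pvSeen (s.take i) [] <+: pvSeen s [] := by
        conv_rhs => rw [show s = s.take i ++ s.drop i by simp, pvSeen_append]
        exact pvSeen_acc_prefix _ _
      obtain ⟨t, ht⟩ := hp
      exact ⟨t, by rw [List.append_assoc, ht]⟩
    by_cases h3 : temp.length < 3
    · -- loop continues; index must be in range
      have hi : i < s.length := by
        by_contra hge
        push_neg at hge
        rw [List.take_of_length_le hge] at hinv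
        rw [hinv] at h3; omega
      rw [pvAWhile, if_pos h3]
      rw [PySem.List.pyGet?_natCast, List.getElem?_eq_getElem hi]
      show pvAWhile s fuel (i + 1)
          (if temp.contains s[i] then temp else temp ++ [s[i]]) = _
      set c := s[i] with hc
      have hnext : (if temp.contains c then temp else temp ++ [c])
          = cons ++ pvSeen (s.take (i + 1)) [] := by
        have hstep : s.take (i + 1) = s.take i ++ [c] := by
          rw [hc]; exact (List.take_succ_eq_append_getElem hi)
        rw [hstep, pvSeen_append, pvSeen_singleton]
        by_cases hv : pvVocali.contains c
        · have hv' : c ∈ pvVocali := by simpa using hv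
          have hcnotcons : c ∉ cons := by
            intro hmem
            rw [hcons] at hmem
            rcases List.mem_filter.mp hmem with ⟨-, hb⟩
            exact (by simpa using hb : c ∉ pvVocali) hv'
          have hmemtemp : temp.contains c = true ↔ c ∈ pvSeen (s.take i) [] := by
            rw [hinv]
            simp [List.contains_eq_mem, List.mem_append, hcnotcons]
          by_cases hseen : c ∈ pvSeen (s.take i) []
          · rw [if_pos (hmemtemp.mpr hseen), hinv,
              if_neg (by simp [List.contains_eq_mem, hseen])]
          · rw [if_neg (by rw [hmemtemp]; exact hseen), hinv,
              if_pos (by simp [hv', List.contains_eq_mem, hseen]), List.append_assoc]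
        · have hv' : c ∉ pvVocali := by simpa using hv
          have hmem : c ∈ temp := by
            rw [hinv]
            apply List.mem_append.mpr
            exact Or.inl (by rw [hcons]; exact List.mem_filter.mpr ⟨List.getElem_mem hi, by simp [hv']⟩)
          rw [if_pos (by simpa [List.contains_eq_mem] using hmem), hinv,
            if_neg (by simp [hv'])]
      rw [hnext]
      apply ih (i + 1)
      · rfl
      · -- new length ≤ 3
        have : (if temp.contains c then temp else temp ++ [c]).length ≤ temp.length + 1 := by
          split <;> simp
        rw [hnext] at this
        omega
      · omega
      · exact htot
    · -- temp already has length 3: loop exits, temp is the take-3 prefix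
      push_neg at h3
      have hlen : temp.length = 3 := by omega
      rw [pvAWhile, if_neg (by omega)]
      rw [List.prefix_iff_eq_take.mp hprefix, hlen]

-- ===== VERDICT (by name: the statement is the Claim_ definition above) =====
theorem estrai_nome_cognome_spec : Claim_equal_estrai_nome_cognome := by
  intro aString _ hpre
  unfold Spec_estrai_nome_cognome estrai_nome_cognome estrai_nome_cognome_alt
  unfold Pre_estrai_nome_cognome at hpre
  set s := (PySem.Str.replace aString " " "").toList with hs
  show String.mk (pvAWhile s (s.length + 1) 0 (pvAFor s []))
      = if 3 ≤ (s.filter (fun c => !pvVocali.contains c)).length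
        then String.mk ((s.filter (fun c => !pvVocali.contains c)).take 3)
        else String.mk (((s.filter (fun c => !pvVocali.contains c)) ++ pvSeen s []).take 3)
  set cons := s.filter (fun c => !pvVocali.contains c) with hcons
  have hfor : pvAFor s [] = cons.take 3 := by
    have h := pvAFor_eq_take s [] (by simp)
    rwa [List.nil_append] at h
  rw [hfor]
  by_cases hC : 3 ≤ cons.length
  · rw [if_pos hC, pvAWhile, if_neg (by simp only [List.length_take]; omega)]
  · rw [if_neg hC]
    push_neg at hC
    have htake : cons.take 3 = cons := List.take_of_length_le (by omega)
    rw [htake]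
    have htot : 3 ≤ (cons ++ pvSeen s []).length := by
      rw [List.length_append, pvSeen_length]
      exact hpre
    rw [pvAWhile_eq s (s.length + 1) 0 cons (by rw [List.take_zero, show pvSeen [] [] = [] from rfl, List.append_nil, hcons]) (by omega) (by omega) htot]
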